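-- pv_equiv track=rewrite | github.com/MAIF/shapash | shapash/utils/utils.py | suffix_duplicates
-- ===== SOURCE A (Python) =====
-- def suffix_duplicates(lst):
--     """
--     Adds suffixes (_2, _3, ...) to non-unique elements in a list to make them unique.
--
--     Args:
--         lst (list): The input list of elements (strings) which may contain duplicates.
--
--     Returns:
--         list: A new list where non-unique elements have suffixes to ensure uniqueness.
--
--     Example:
--         Input: ["feature1", "feature2", "feature1", "feature2", "feature3"]
--         Output: ["feature1", "feature2", "feature1_2", "feature2_2", "feature3"]
--     """
--
--     seen = {}
--     result = []
--
--     for item in lst: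
--         if item in seen:
--             # If the item has been seen before, increment its count and add a suffix
--             seen[item] += 1
--             new_item = f"{item}_{seen[item] + 1}"
--         else:
--             # If the item is seen for the first time, add it without a suffix
--             seen[item] = 0
--             new_item = item
--
--         result.append(new_item)
--
--     return result
-- ===== SOURCE B (Python) =====
-- def suffix_duplicates(lst):
--     # Stage 1: group the positions of each distinct element.
--     positions = {}
--     for i, item in enumerate(lst):
--         positions.setdefault(item, []).append(i)
--     # Stage 2: scatter each group back, numbering occurrences by their rank.
--     result = [None] * len(lst)
--     for item, idxs in positions.items():
--         for k, i in enumerate(idxs):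
--             result[i] = item if k == 0 else f"{item}_{k + 1}"
--     return result
-- ===== Notes on version B (the rewrite author's own statement) =====
-- stated objective: alternative
-- what changed: Replaces A's single forward pass with a running per-element counter by a two-stage group-and-scatter: first build a map from each distinct element to the list of its positions, then fill a preallocated result out of order, suffixing each group's occurrences by their rank.
import Mathlib
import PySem

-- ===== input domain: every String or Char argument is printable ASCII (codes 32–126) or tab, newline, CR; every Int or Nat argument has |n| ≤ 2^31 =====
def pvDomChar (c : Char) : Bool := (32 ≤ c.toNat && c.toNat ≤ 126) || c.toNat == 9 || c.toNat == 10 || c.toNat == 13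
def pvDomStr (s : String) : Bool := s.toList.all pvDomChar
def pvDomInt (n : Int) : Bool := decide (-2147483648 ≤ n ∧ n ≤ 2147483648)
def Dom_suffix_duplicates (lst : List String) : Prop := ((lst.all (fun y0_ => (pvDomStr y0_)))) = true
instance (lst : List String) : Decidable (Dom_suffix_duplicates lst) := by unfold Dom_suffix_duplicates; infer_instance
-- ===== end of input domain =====

-- B replaces A's single forward pass with a running per-element counter by a two-stage
-- group-and-scatter: group positions per distinct element, then scatter each group back by rank
-- (objective: alternative; same values on every input).

-- ===== PORT A =====
-- literal transliteration of A: one fold carrying the 'seen' dict and the growing result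
def suffix_duplicates (lst : List String) : List String :=
  (lst.foldl
    (fun (st : PySem.Dict String Int × List String) item =>
      if st.1.contains item then
        let c := st.1.getD item 0 + 1
        (st.1.insert item c, st.2 ++ [item ++ "_" ++ PySem.Int.toStr (c + 1)])
      else
        (st.1.insert item 0, st.2 ++ [item]))
    (PySem.Dict.empty, [])).2

-- ===== PORT B =====
-- literal transliteration of B (Source B): stage 1 groups each element's positions
-- ('setdefault(item, []).append(i)' is Dict.modify item [] (· ++ [i])); stage 2 preallocates
-- [None]*len and scatters each group's occurrences by rank; the final map un-Options the cells
-- (exact: every index is written exactly once, so the default is never read).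
def suffix_duplicates_alt (lst : List String) : List String :=
  let positions : PySem.Dict String (List Int) :=
    (PySem.List.enumerate lst 0).foldl
      (fun d p => d.modify p.2 [] (fun l => l ++ [p.1])) PySem.Dict.empty
  let result0 : List (Option String) := List.replicate lst.length none
  let result := positions.items.foldl
      (fun r pr =>
        (PySem.List.enumerate pr.2 0).foldl
          (fun r q => r.set q.2.toNat
            (some (if q.1 = 0 then pr.1 else pr.1 ++ "_" ++ PySem.Int.toStr (q.1 + 1)))) r)
      result0
  result.map (fun o => o.getD "")

-- ===== PRECONDITION & SPEC =====
def Spec_suffix_duplicates (lst : List String) (out : List String) : Prop := out = suffix_duplicates_alt lst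
instance (lst : List String) (out : List String) : Decidable (Spec_suffix_duplicates lst out) := by unfold Spec_suffix_duplicates; infer_instance

-- ===== CLAIM =====
def Claim_equal_suffix_duplicates : Prop := ∀ (lst : List String), Dom_suffix_duplicates lst → Spec_suffix_duplicates lst (suffix_duplicates lst)

-- ===== LEMMAS AND PROOFS =====

-- the common value: element x at its c-th repetition (c = number of earlier occurrences)
def sval (x : String) (c : Nat) : String :=
  if c = 0 then x else x ++ "_" ++ PySem.Int.toStr ((c : Int) + 1)

-- common recursive characterisation of A's output: each element tagged from the prefix before it
def sdSpec (p : List String) : List String → List String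
  | [] => []
  | x :: xs => sval x (p.count x) :: sdSpec (p ++ [x]) xs

-- the positions of x in xs, offset by n (what B's grouping dict stores under key x)
def occFrom : List String → String → Int → List Int
  | [], _, _ => []
  | y :: ys, x, n => if y = x then n :: occFrom ys x (n + 1) else occFrom ys x (n + 1)

-- the scatter step of B's inner loop, for group key x
def scat1 (x : String) (r : List (Option String)) (q : Int × Int) : List (Option String) :=
  r.set q.2.toNat (some (if q.1 = 0 then x else x ++ "_" ++ PySem.Int.toStr (q.1 + 1)))

lemma sd_a_aux (xs : List String) : ∀ (p : List String) (seen : PySem.Dict String Int) (res : List String),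
    (∀ x, seen.get? x = if p.count x = 0 then none else some ((p.count x : Int) - 1)) →
    (xs.foldl
      (fun (st : PySem.Dict String Int × List String) item =>
        if st.1.contains item then
          let c := st.1.getD item 0 + 1
          (st.1.insert item c, st.2 ++ [item ++ "_" ++ PySem.Int.toStr (c + 1)])
        else
          (st.1.insert item 0, st.2 ++ [item]))
      (seen, res)).2 = res ++ sdSpec p xs := by
  induction xs with
  | nil => intro p seen res _; simp [sdSpec]
  | cons x xs ih =>
    intro p seen res hseen
    simp only [List.foldl_cons]
    by_cases h0 : p.count x = 0
    · have hc : seen.contains x = false := by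
        rw [PySem.Dict.contains_eq_isSome_get?, hseen x, if_pos h0]; rfl
      rw [hc]
      simp only [Bool.false_eq_true, if_false]
      rw [ih (p ++ [x]) _ _ ?_]
      · simp [sdSpec, sval, h0]
      · intro y
        rw [PySem.Dict.get?_insert]
        by_cases hy : y = x
        · subst hy; simp [h0]
        · rw [if_neg hy, hseen y]
          have : (p ++ [x]).count y = p.count y := by
            simp only [List.count_append, List.count_singleton]
            have hxy : (x == y) = false := beq_eq_false_iff_ne.mpr (fun h => hy (Eq.symm h))
            simp [hxy]
          rw [this]
    · have hc : seen.contains x = true := by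
        rw [PySem.Dict.contains_eq_isSome_get?, hseen x, if_neg h0]; rfl
      rw [hc]
      simp only [if_true]
      have hgd : seen.getD x 0 = (p.count x : Int) - 1 := by
        rw [PySem.Dict.getD_eq_get?_getD, hseen x, if_neg h0]; rfl
      rw [ih (p ++ [x]) _ _ ?_]
      · simp only [sdSpec, sval, if_neg h0, hgd]
        have : (p.count x : Int) - 1 + 1 = (p.count x : Int) := by ring
        rw [this]
        simp
      · intro y
        rw [PySem.Dict.get?_insert]
        by_cases hy : y = x
        · subst hy
          have : (p ++ [y]).count y = p.count y + 1 := by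
            simp [List.count_append]
          rw [if_pos rfl, this, hgd]
          have hne : (p.count y : Nat) + 1 ≠ 0 := by omega
          rw [if_neg hne]
          push_cast
          ring_nf
        · rw [if_neg hy, hseen y]
          have : (p ++ [x]).count y = p.count y := by
            simp only [List.count_append, List.count_singleton]
            have hxy : (x == y) = false := beq_eq_false_iff_ne.mpr (fun h => hy (Eq.symm h))
            simp [hxy]
          rw [this]

-- A's characterisation as a per-index map
lemma sdSpec_eq_map (xs : List String) : ∀ (p : List String),
    sdSpec p xs = (List.range xs.length).map
      (fun j => sval (xs.getD j "") ((p ++ xs.take j).count (xs.getD j ""))) := by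
  induction xs with
  | nil => intro p; simp [sdSpec]
  | cons x xs ih =>
    intro p
    rw [sdSpec, ih (p ++ [x])]
    rw [List.length_cons, List.range_succ_eq_map, List.map_cons, List.map_map]
    congr 1
    · simp
    · refine List.map_congr_left (fun j _ => ?_)
      simp only [Function.comp_apply, List.getD_cons_succ, List.take_succ_cons]
      have : p ++ [x] ++ List.take j xs = p ++ x :: List.take j xs := by simp
      rw [this]

-- B's grouping dict stores occFrom under each key
lemma occ_eq (xs : List String) : ∀ (n : Int) (x : String),
    (((PySem.List.enumerate xs n).map Prod.swap).filter (fun p => p.1 == x)).map (fun p => p.2)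
      = occFrom xs x n := by
  induction xs with
  | nil => intro n x; simp [occFrom, PySem.List.enumerate_nil]
  | cons y ys ih =>
    intro n x
    rw [PySem.List.enumerate_cons, List.map_cons, List.filter_cons]
    by_cases h : y = x
    · subst h; simp [occFrom, ih]
    · simp [occFrom, ih, h]

-- membership in occFrom
lemma mem_occFrom {xs : List String} {x : String} : ∀ {n j : Int}, j ∈ occFrom xs x n →
    ∃ m : Nat, m < xs.length ∧ j = n + m ∧ xs.getD m "" = x := by
  induction xs with
  | nil => intro n j h; simp [occFrom] at h
  | cons y ys ih =>
    intro n j h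
    by_cases hy : y = x
    · rw [occFrom, if_pos hy] at h
      rcases List.mem_cons.mp h with h | h
      · exact ⟨0, by simp, by simp [h], by simpa using hy⟩
      · obtain ⟨m, hm, hj, hx⟩ := ih h
        exact ⟨m + 1, by simpa using hm, by push_cast; omega, by simpa using hx⟩
    · rw [occFrom, if_neg hy] at h
      obtain ⟨m, hm, hj, hx⟩ := ih h
      exact ⟨m + 1, by simpa using hm, by push_cast; omega, by simpa using hx⟩

-- occFrom is strictly increasing (so Nodup, entries ≥ n)
lemma occFrom_pairwise (xs : List String) : ∀ (x : String) (n : Int),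
    (occFrom xs x n).Pairwise (· < ·) := by
  induction xs with
  | nil => intro x n; simp [occFrom]
  | cons y ys ih =>
    intro x n
    rw [occFrom]
    split_ifs
    · refine List.pairwise_cons.mpr ⟨?_, ih x (n + 1)⟩
      intro j hj
      obtain ⟨m, _, hj', _⟩ := mem_occFrom hj
      omega
    · exact ih x (n + 1)

-- rank: the position of x's c-th occurrence inside its group, c = prefix count
lemma occFrom_rank (xs : List String) : ∀ (x : String) (n : Int) (j : Nat), j < xs.length →
    xs.getD j "" = x → (occFrom xs x n)[(xs.take j).count x]? = some (n + j) := by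
  induction xs with
  | nil => intro x n j h _; simp at h
  | cons y ys ih =>
    intro x n j hj hx
    cases j with
    | zero =>
      simp only [List.getD_cons_zero] at hx
      simp [occFrom, hx]
    | succ j =>
      simp only [List.getD_cons_succ] at hx
      have hj' : j < ys.length := by simpa using hj
      rw [List.take_succ_cons, List.count_cons]
      by_cases hy : y = x
      · rw [occFrom, if_pos hy]
        have hb : (y == x) = true := beq_iff_eq.mpr hy
        simp only [hb, if_true, List.getElem?_cons_succ]
        rw [ih x (n + 1) j hj' hx]
        congr 1; push_cast; ring
      · rw [occFrom, if_neg hy]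
        have hb : (y == x) = false := beq_eq_false_iff_ne.mpr hy
        simp only [hb, Bool.false_eq_true, if_false, Nat.add_zero]
        rw [ih x (n + 1) j hj' hx]
        congr 1; push_cast; ring

-- scatter folds preserve length
lemma scat_len (x : String) : ∀ (qs : List (Int × Int)) (r : List (Option String)),
    (qs.foldl (scat1 x) r).length = r.length := by
  intro qs
  induction qs with
  | nil => intro r; rfl
  | cons q qs ih => intro r; rw [List.foldl_cons, ih, scat1, List.length_set]

lemma outer_len (gs : List (String × List Int)) : ∀ (r : List (Option String)),
    (gs.foldl (fun r pr => (PySem.List.enumerate pr.2 0).foldl (scat1 pr.1) r) r).length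
      = r.length := by
  induction gs with
  | nil => intro r; rfl
  | cons g gs ih => intro r; rw [List.foldl_cons, ih, scat_len]

-- a scatter fold leaves untouched indices unchanged
lemma scat_miss (x : String) : ∀ (qs : List (Int × Int)) (r : List (Option String)) (j : Nat),
    (∀ q ∈ qs, q.2.toNat ≠ j) → (qs.foldl (scat1 x) r)[j]? = r[j]? := by
  intro qs
  induction qs with
  | nil => intro r j _; rfl
  | cons q qs ih =>
    intro r j h
    rw [List.foldl_cons, ih _ _ (fun q hq => h q (List.mem_cons_of_mem _ hq)), scat1,
      List.getElem?_set_ne (h q (List.mem_cons_self))]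

-- the inner scatter over a group: the k-th listed index receives rank m + k
lemma scat_hit (x : String) : ∀ (l : List Int) (m : Int) (r : List (Option String)) (k : Nat)
    (j : Int), l.Pairwise (· < ·) → (∀ i ∈ l, 0 ≤ i) → l[k]? = some j → j.toNat < r.length →
    ((PySem.List.enumerate l m).foldl (scat1 x) r)[j.toNat]?
      = some (some (if m + (k : Int) = 0 then x else x ++ "_" ++ PySem.Int.toStr (m + (k : Int) + 1))) := by
  intro l
  induction l with
  | nil => intro m r k j _ _ hk; simp at hk
  | cons a l ih =>
    intro m r k j hpw hnn hk hlt
    rw [PySem.List.enumerate_cons, List.foldl_cons]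
    cases k with
    | zero =>
      simp only [List.getElem?_cons_zero, Option.some_inj] at hk
      subst hk
      rw [scat_miss]
      · rw [scat1]
        simp only [Nat.cast_zero, add_zero]
        exact List.getElem?_set_self (by simpa [scat1, List.length_set] using hlt)
      · intro q hq
        obtain ⟨k', hk', hq'⟩ := (PySem.List.mem_enumerate_iff _ _ _).mp hq
        have hmem : l[k'] ∈ l := List.getElem_mem hk'
        have h1 : a < l[k'] := (List.pairwise_cons.mp hpw).1 _ hmem
        have h2 : 0 ≤ a := hnn a List.mem_cons_self
        have h3 : q.2 = l[k'] := by rw [hq']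
        have h4 : 0 ≤ l[k'] := hnn _ (List.mem_cons_of_mem _ hmem)
        omega
    | succ k =>
      simp only [List.getElem?_cons_succ] at hk
      have hjl : j ∈ l := List.mem_of_getElem? hk
      have hres := ih (m + 1) (scat1 x r (m, a)) k j (List.pairwise_cons.mp hpw).2
        (fun i hi => hnn i (List.mem_cons_of_mem _ hi)) hk
        (by simpa [scat1, List.length_set] using hlt)
      rw [hres]
      have : m + 1 + (k : Int) = m + ((k : Nat) + 1 : Nat) := by push_cast; ring
      rw [this]

-- a fold over groups none of which lists index j leaves it unchanged
lemma outer_miss : ∀ (gs : List (String × List Int)) (r : List (Option String)) (j : Nat),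
    (∀ pr ∈ gs, ∀ q ∈ PySem.List.enumerate pr.2 0, q.2.toNat ≠ j) →
    (gs.foldl (fun r pr => (PySem.List.enumerate pr.2 0).foldl (scat1 pr.1) r) r)[j]? = r[j]? := by
  intro gs
  induction gs with
  | nil => intro r j _; rfl
  | cons g gs ih =>
    intro r j h
    rw [List.foldl_cons, ih _ _ (fun pr hpr => h pr (List.mem_cons_of_mem _ hpr)),
      scat_miss _ _ _ _ (h g List.mem_cons_self)]

-- the outer scatter over all groups, read at index j (whose element is x)
lemma outer_scatter (lst : List String) : ∀ (gs : List (String × List Int))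
    (r : List (Option String)) (j : Nat) (x : String), j < r.length →
    (∀ pr ∈ gs, pr.2 = occFrom lst pr.1 0) → (gs.map Prod.fst).Nodup →
    (x, occFrom lst x 0) ∈ gs → j < lst.length → lst.getD j "" = x →
    (gs.foldl (fun r pr => (PySem.List.enumerate pr.2 0).foldl (scat1 pr.1) r) r)[j]?
      = some (some (sval x ((lst.take j).count x))) := by
  intro gs
  induction gs with
  | nil => intro r j x _ _ _ hmem; simp at hmem
  | cons g gs ih =>
    intro r j x hjr hocc hnd hmem hjl hx
    rw [List.foldl_cons]
    by_cases hg : g.1 = x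
    · -- this group is x's: the inner fold writes j; later groups never touch j
      have hg2 : g.2 = occFrom lst x 0 := by rw [hocc g List.mem_cons_self, hg]
      have hrank := occFrom_rank lst x 0 j hjl hx
      rw [zero_add] at hrank
      have hhit := scat_hit g.1 g.2 0 r ((lst.take j).count x) (j : Int)
        (by rw [hg2]; exact occFrom_pairwise lst x 0)
        (by rw [hg2]; intro i hi; obtain ⟨m, _, hm, _⟩ := mem_occFrom hi; omega)
        (by rw [hg2]; exact hrank) (by simpa using hjr)
      rw [Int.toNat_natCast] at hhit
      have hxnot : x ∉ gs.map Prod.fst := by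
        rw [List.map_cons, List.nodup_cons, hg] at hnd
        exact hnd.1
      rw [outer_miss gs _ j ?_, hhit, hg]
      · simp [sval]
      · -- no later group lists index j: their keys differ from x = lst[j]
        intro pr hpr q hq hcon
        obtain ⟨k', hk', hq'⟩ := (PySem.List.mem_enumerate_iff _ _ _).mp hq
        have hq2 : q.2 ∈ pr.2 := by rw [hq']; exact List.getElem_mem hk'
        rw [hocc pr (List.mem_cons_of_mem _ hpr)] at hq2
        obtain ⟨m, hm, hm', hmx⟩ := mem_occFrom hq2
        have hmj : m = j := by omega
        exact hxnot (by
          have : pr.1 = x := by rw [← hmx, hmj, hx]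
          rw [← this]
          exact List.mem_map_of_mem hpr)
    · -- not x's group: the inner fold cannot matter at j, recurse
      refine ih _ j x ?_ (fun pr h => hocc pr (List.mem_cons_of_mem _ h))
        (List.nodup_cons.mp (by simpa using hnd)).2 ?_ hjl hx
      · rw [scat_len]; exact hjr
      · rcases List.mem_cons.mp hmem with h | h
        · exact absurd (congrArg Prod.fst h).symm hg
        · exact h

-- B equals the per-index map
lemma alt_eq_map (lst : List String) :
    suffix_duplicates_alt lst = (List.range lst.length).map
      (fun j => sval (lst.getD j "") ((lst.take j).count (lst.getD j ""))) := by
  unfold suffix_duplicates_alt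
  set P := ((PySem.List.enumerate lst 0).foldl
      (fun d p => d.modify p.2 [] (fun l => l ++ [p.1])) PySem.Dict.empty) with hPdef
  have hP : P = ((PySem.List.enumerate lst 0).map Prod.swap).foldl
      (fun d p => d.modify p.1 [] (fun x => x ++ [p.2])) PySem.Dict.empty := by
    rw [List.foldl_map]
    rfl
  have hgetD : ∀ x, P.getD x [] = occFrom lst x 0 := by
    intro x
    rw [hP, PySem.Dict.getD_foldl_modify_append, PySem.Dict.getD_empty, List.nil_append, occ_eq]
  have hkeys : P.keys = PySem.Set.ofList lst := by
    rw [hPdef, PySem.Dict.keys_foldl_modify_key, PySem.Dict.keys_empty,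
      PySem.List.map_snd_enumerate, PySem.Set.update_nil_left]
  have hnd : P.keys.Nodup := by rw [hkeys]; exact PySem.Set.nodup_ofList lst
  have hitems : P.items = P.keys.map (fun k => (k, P.getD k [])) :=
    PySem.Dict.items_eq_map_keys P hnd []
  rw [show (fun (r : List (Option String)) (pr : String × List Int) =>
      (PySem.List.enumerate pr.2 0).foldl (fun r q => r.set q.2.toNat
        (some (if q.1 = 0 then pr.1 else pr.1 ++ "_" ++ PySem.Int.toStr (q.1 + 1)))) r)
      = (fun r pr => (PySem.List.enumerate pr.2 0).foldl (scat1 pr.1) r) from rfl]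
  apply List.ext_getElem?
  intro i
  rw [List.getElem?_map]
  by_cases hi : i < lst.length
  · have hx : lst.getD i "" = lst[i] := List.getD_eq_getElem lst "" hi
    have houter := outer_scatter lst P.items (List.replicate lst.length none) i (lst.getD i "")
      (by rw [List.length_replicate]; exact hi)
      (by intro pr hpr
          rw [hitems] at hpr
          obtain ⟨k, _, hk⟩ := List.mem_map.mp hpr
          rw [← hk]
          exact hgetD k)
      (by have : P.items.map Prod.fst = P.keys := rfl
          rw [this]; exact hnd)
      (by rw [hitems]
          have hmemk : lst.getD i "" ∈ P.keys := by
            rw [hkeys, PySem.Set.mem_ofList, hx]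
            exact List.getElem_mem hi
          have := List.mem_map_of_mem (f := fun k => (k, P.getD k [])) hmemk
          simpa [hgetD] using this)
      hi rfl
    rw [houter, List.getElem?_map, List.getElem?_range hi]
    rfl
  · have hn : lst.length ≤ i := le_of_not_gt hi
    rw [List.getElem?_eq_none (show (P.items.foldl
        (fun r pr => (PySem.List.enumerate pr.2 0).foldl (scat1 pr.1) r)
        (List.replicate lst.length none)).length ≤ i by
          rw [outer_len, List.length_replicate]; exact hn)]
    rw [List.getElem?_eq_none (show ((List.range lst.length).map
        (fun j => sval (lst.getD j "") ((lst.take j).count (lst.getD j "")))).length ≤ i by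
          simpa using hn)]
    rfl

-- ===== VERDICT =====
theorem suffix_duplicates_spec : Claim_equal_suffix_duplicates := by
  intro lst _
  unfold Spec_suffix_duplicates
  unfold suffix_duplicates
  rw [sd_a_aux lst [] PySem.Dict.empty [] (by intro x; simp [PySem.Dict.get?_empty])]
  rw [List.nil_append, sdSpec_eq_map lst [], alt_eq_map lst]
  simp
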